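-- pv_equiv track=rewrite | github.com/Mindgames/skills | skills/gh-pr-audit/scripts/review_pr.py | _match_filters
-- ===== SOURCE A (Python) =====
-- def _match_filters(path: str, filters: list[str]) -> bool:
--     if not filters:
--         return True
--     normalized = path.replace("\\", "/")
--     for item in filters:
--         needle = item.replace("\\", "/").rstrip("/")
--         if normalized == needle or normalized.startswith(f"{needle}/"):
--             return True
--     return False
-- ===== SOURCE B (Python) =====
-- def _match_filters(path: str, filters: list[str]) -> bool:
--     if not filters:
--         return True
--     normalized = path.replace("\\", "/")
--     prefixes = {normalized}
--     for i, ch in enumerate(normalized):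
--         if ch == "/":
--             prefixes.add(normalized[:i])
--     return any(f.replace("\\", "/").rstrip("/") in prefixes for f in filters)
-- ===== Notes on version B (the rewrite author's own statement) =====
-- stated objective: alternative
-- what changed: B precomputes the set of all '/'-cut ancestor prefixes of the normalized path once and tests each normalized, slash-stripped filter by set membership, instead of A's per-filter equality-or-startswith scan.
import Mathlib
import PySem

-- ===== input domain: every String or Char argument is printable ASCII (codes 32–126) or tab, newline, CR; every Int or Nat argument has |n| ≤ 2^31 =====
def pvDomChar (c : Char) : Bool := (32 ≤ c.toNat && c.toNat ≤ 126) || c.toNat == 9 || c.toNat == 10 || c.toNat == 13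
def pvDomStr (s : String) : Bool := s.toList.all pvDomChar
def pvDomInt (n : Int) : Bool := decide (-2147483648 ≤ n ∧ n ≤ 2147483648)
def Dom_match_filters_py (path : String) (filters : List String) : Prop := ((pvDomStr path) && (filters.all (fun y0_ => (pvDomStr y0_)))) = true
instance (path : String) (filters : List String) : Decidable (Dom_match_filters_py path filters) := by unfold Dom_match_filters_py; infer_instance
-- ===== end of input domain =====

-- B replaces A's per-filter startswith scan by a one-time table of the path's '/'-prefixes
-- followed by set-membership tests per filter (objective: alternative data structure, same cost here).

-- shared normalization: s.replace("\\", "/") on code points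
def pvNorm (s : List Char) : List Char := PySem.Chars.replace s ['\\'] ['/']

-- hand port of str.rstrip("/") for the single strip character '/': exact (drops exactly the trailing '/'s)
def pvRstripSlash (s : List Char) : List Char := (s.reverse.dropWhile (· == '/')).reverse

-- ===== PORT A =====
-- the for-loop with early return, as structural recursion over filters
def pvLoopA (normalized : List Char) : List String → Bool
  | [] => false
  | item :: rest =>
    let needle := pvRstripSlash (pvNorm item.toList)
    if normalized = needle ∨ PySem.Chars.startswith normalized (needle ++ ['/']) then true
    else pvLoopA normalized rest

def match_filters_py (path : String) (filters : List String) : Bool :=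
  if filters = [] then true
  else pvLoopA (pvNorm path.toList) filters

-- ===== PORT B =====
-- prefixes = {normalized} ∪ {normalized[:i] | normalized[i] == '/'}, built by the enumerate loop
def pvPrefixes (normalized : List Char) : PySem.Set (List Char) :=
  (PySem.List.enumerate normalized).foldl
    (fun s p => if p.2 == '/' then PySem.Set.add s (PySem.List.slice normalized none (some p.1)) else s)
    (PySem.Set.ofList [normalized])

def match_filters_py_alt (path : String) (filters : List String) : Bool :=
  if filters = [] then true
  else
    let normalized := pvNorm path.toList
    let prefixes := pvPrefixes normalized
    filters.any (fun f => PySem.Set.contains prefixes (pvRstripSlash (pvNorm f.toList)))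

-- ===== PRECONDITION & SPEC =====
def Spec_match_filters_py (path : String) (filters : List String) (out : Bool) : Prop := out = match_filters_py_alt path filters
instance (path : String) (filters : List String) (out : Bool) : Decidable (Spec_match_filters_py path filters out) := by unfold Spec_match_filters_py; infer_instance

-- ===== CLAIM (what is proved, stated in full; the proofs are below) =====
def Claim_equal_match_filters_py : Prop := ∀ (path : String) (filters : List String), Dom_match_filters_py path filters → Spec_match_filters_py path filters (match_filters_py path filters)

-- ===== LEMMAS AND PROOFS =====

-- membership in the fold that builds the prefix table
theorem mem_foldl_pvPrefixes (n : List Char) (l : List (Int × Char)) (s : PySem.Set (List Char)) (x : List Char) :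
    x ∈ l.foldl (fun s p => if p.2 == '/' then PySem.Set.add s (PySem.List.slice n none (some p.1)) else s) s ↔
      x ∈ s ∨ ∃ p ∈ l, p.2 = '/' ∧ x = PySem.List.slice n none (some p.1) := by
  induction l generalizing s with
  | nil => simp
  | cons q l ih =>
    rw [List.foldl_cons, ih]
    by_cases hq : q.2 = '/'
    · simp only [hq, beq_self_eq_true, if_true, PySem.Set.mem_add, List.mem_cons]
      aesop
    · simp only [List.mem_cons]
      aesop

-- the prefix table contains exactly: the path itself, and every cut just before a '/'
theorem mem_pvPrefixes (n x : List Char) :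
    x ∈ pvPrefixes n ↔ x = n ∨ ∃ k, ∃ _ : k < n.length, n[k] = '/' ∧ x = n.take k := by
  unfold pvPrefixes
  rw [mem_foldl_pvPrefixes]
  simp only [PySem.Set.mem_ofList, List.mem_singleton]
  constructor
  · rintro (h | ⟨p, hp, hc, hx⟩)
    · exact Or.inl h
    · rw [PySem.List.mem_enumerate_iff] at hp
      obtain ⟨k, hk, rfl⟩ := hp
      refine Or.inr ⟨k, hk, hc, ?_⟩
      rw [hx]
      simp [PySem.List.slice_to n (by positivity : (0:Int) ≤ (k:Int))]
  · rintro (h | ⟨k, hk, hc, hx⟩)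
    · exact Or.inl h
    · refine Or.inr ⟨((k : Int), n[k]), ?_, hc, ?_⟩
      · rw [PySem.List.mem_enumerate_iff]
        exact ⟨k, hk, by simp⟩
      · rw [hx]
        simp [PySem.List.slice_to n (by positivity : (0:Int) ≤ (k:Int))]

-- table membership coincides with A's per-filter test
theorem mem_pvPrefixes_iff_test (n needle : List Char) :
    needle ∈ pvPrefixes n ↔ (n = needle ∨ PySem.Chars.startswith n (needle ++ ['/']) = true) := by
  rw [mem_pvPrefixes, PySem.Chars.startswith_iff]
  constructor
  · rintro (rfl | ⟨k, hk, hc, rfl⟩)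
    · exact Or.inl rfl
    · refine Or.inr ?_
      have h1 : n.take k ++ ['/'] = n.take (k + 1) := by
        rw [List.take_add_one]
        simp [List.getElem?_eq_getElem hk, hc]
      rw [h1]
      exact List.take_prefix _ _
  · rintro (rfl | h)
    · exact Or.inl rfl
    · obtain ⟨t, ht⟩ := h
      subst ht
      refine Or.inr ⟨needle.length, by simp, ?_, ?_⟩
      · simp
      · rw [List.append_assoc]
        exact List.take_left.symm

-- Set.contains agrees with membership
theorem contains_pvPrefixes (n x : List Char) :
    PySem.Set.contains (pvPrefixes n) x = decide (x ∈ pvPrefixes n) := by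
  simp [PySem.Set.contains]

-- A's loop is B's any over the membership test
theorem pvLoopA_eq_any (n : List Char) (fs : List String) :
    pvLoopA n fs = fs.any (fun f => PySem.Set.contains (pvPrefixes n) (pvRstripSlash (pvNorm f.toList))) := by
  induction fs with
  | nil => simp [pvLoopA]
  | cons f rest ih =>
    have hc : PySem.Set.contains (pvPrefixes n) (pvRstripSlash (pvNorm f.toList)) =
        decide (n = pvRstripSlash (pvNorm f.toList) ∨
          PySem.Chars.startswith n (pvRstripSlash (pvNorm f.toList) ++ ['/']) = true) := by
      rw [contains_pvPrefixes]
      simp [mem_pvPrefixes_iff_test]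
    simp only [pvLoopA, List.any_cons, hc, ih]
    by_cases h : n = pvRstripSlash (pvNorm f.toList) ∨
        PySem.Chars.startswith n (pvRstripSlash (pvNorm f.toList) ++ ['/']) = true
    · simp [h]
    · simp [h]

-- ===== VERDICT (by name: the statement is the Claim_ definition above) =====
theorem match_filters_py_spec : Claim_equal_match_filters_py := by
  intro path filters _
  unfold Spec_match_filters_py match_filters_py match_filters_py_alt
  by_cases h : filters = []
  · simp [h]
  · simp only [if_neg h]
    exact pvLoopA_eq_any _ _
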